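-- pv_equiv track=rewrite | github.com/finneh4249/Pyramid-Message-Decoder | decode.py | createPyramid
-- ===== SOURCE A (Python) =====
-- def createPyramid(dict):
--     pyramid = []
--     counter = 1
--     nextKey = 1
--     while dict:
--         row = []
--         for i in range(counter):
--             if nextKey in dict:
--                 row.append(dict.pop(nextKey))
--                 nextKey+=1
--             else:
--                 return None
--         pyramid.append(row)
--         counter+=1
--     return pyramid
-- ===== SOURCE B (Python) =====
-- def createPyramid(dict):
--     # Flat two-pass version: check that the keys are exactly 1..len(dict),
--     # extract the values in key order, then partition them into rows 1,2,3,...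
--     # (Unlike A, this does not mutate the input dict; return value is identical.)
--     n = len(dict)
--     if any(k not in dict for k in range(1, n + 1)):
--         return None
--     values = [dict[k] for k in range(1, n + 1)]
--     return _rows(values, 1)
--
--
-- def _rows(values, size):
--     if not values:
--         return []
--     if size > len(values):
--         return None
--     rest = _rows(values[size:], size + 1)
--     return None if rest is None else [values[:size]] + rest
-- ===== Notes on version B (the rewrite author's own statement) =====
-- stated objective: alternative
-- what changed: A interleaves popping consecutive keys from the dict with building each row inside one stateful while/for loop; B is two flat passes: a membership check that the keys are exactly 1..len(dict), a single extraction of the values in key order, and a recursive partition of that flat list into rows of sizes 1,2,3,... (B also leaves the input dict unmutated, whereas A empties it).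
import Mathlib
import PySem

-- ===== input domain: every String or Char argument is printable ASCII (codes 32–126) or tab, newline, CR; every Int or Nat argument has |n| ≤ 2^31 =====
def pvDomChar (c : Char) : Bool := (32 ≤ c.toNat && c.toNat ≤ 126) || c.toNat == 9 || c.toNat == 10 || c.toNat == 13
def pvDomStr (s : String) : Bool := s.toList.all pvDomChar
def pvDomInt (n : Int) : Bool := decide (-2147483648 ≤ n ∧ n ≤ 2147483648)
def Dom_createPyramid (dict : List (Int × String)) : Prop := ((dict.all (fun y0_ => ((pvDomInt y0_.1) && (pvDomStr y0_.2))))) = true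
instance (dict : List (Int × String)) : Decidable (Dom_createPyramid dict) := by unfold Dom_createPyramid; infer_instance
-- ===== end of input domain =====

-- B replaces A's single interleaved pop-and-build loop by two flat passes (membership check + extraction,
-- then a recursive partition into rows of sizes 1,2,3,…); return values are proved identical (A additionally
-- empties the dict it is given — B does not mutate it; the equivalence is about the return value).

-- ===== PORT A =====
-- inner 'for i in range(counter)' loop: pop nextKey if present (the membership test followed by
-- dict.pop(nextKey) is exactly Dict.pop?: some ↔ the key is present), else the whole call returns None
def pvInnerA : PySem.Dict Int String → List String → Int → Nat → Option (PySem.Dict Int String × List String × Int)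
  | d, row, nextKey, 0 => some (d, row, nextKey)
  | d, row, nextKey, c + 1 =>
    match d.pop? nextKey with
    | some (v, d') => pvInnerA d' (row ++ [v]) (nextKey + 1) c
    | none => none

-- outer 'while dict:' loop; fuel = d.size + 1 at the top call is provably sufficient since every
-- iteration that does not return removes counter ≥ 1 entries from the dict
def pvLoopA : Nat → PySem.Dict Int String → List (List String) → Nat → Int → Option (List (List String))
  | 0, _, _, _, _ => none
  | fuel + 1, d, pyramid, counter, nextKey =>
    if d.size = 0 then some pyramid
    else
      match pvInnerA d [] nextKey counter with
      | some (d', row, nextKey') => pvLoopA fuel d' (pyramid ++ [row]) (counter + 1) nextKey'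
      | none => none

def createPyramid (dict : List (Int × String)) : Option (List (List String)) :=
  let d := PySem.Dict.ofList dict
  pvLoopA (d.size + 1) d [] 1 1

-- ===== PORT B =====
-- _rows(values, size): recursive partition of the flat value list into rows of growing size
def pvRows : List String → Nat → Option (List (List String))
  | [], _ => some []
  | v :: rest, size =>
    if size ≤ rest.length + 1 then
      (pvRows ((v :: rest).drop size) (size + 1)).map (((v :: rest).take size) :: ·)
    else none
termination_by vs size => 2 * vs.length + (1 - size)
decreasing_by
  cases size <;>
    simp only [List.drop_succ_cons, List.length_cons, List.length_drop, List.drop_zero] <;>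
    omega

def createPyramid_alt (dict : List (Int × String)) : Option (List (List String)) :=
  let d := PySem.Dict.ofList dict
  let n := d.size
  if (PySem.List.pyRange 1 ((n : Int) + 1) 1).any (fun k => !(d.contains k)) then none
  else pvRows ((PySem.List.pyRange 1 ((n : Int) + 1) 1).map (fun k => d.getD k "")) 1

-- ===== PRECONDITION & SPEC =====
def Spec_createPyramid (dict : List (Int × String)) (out : Option (List (List String))) : Prop := out = createPyramid_alt dict
instance (dict : List (Int × String)) (out : Option (List (List String))) : Decidable (Spec_createPyramid dict out) := by unfold Spec_createPyramid; infer_instance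

-- ===== CLAIM (what is proved, stated in full; the proofs are below) =====
def Claim_equal_createPyramid : Prop := ∀ (dict : List (Int × String)), Dom_createPyramid dict → Spec_createPyramid dict (createPyramid dict)

-- ===== LEMMAS AND PROOFS =====

-- the values stored at the keys k, k+1, …, k+n-1
def pvVals (d : PySem.Dict Int String) (k : Int) (n : Nat) : List String :=
  (List.range n).map (fun j : Nat => d.getD (k + (j : Int)) "")

theorem pvVals_succ (d : PySem.Dict Int String) (k : Int) (n : Nat) :
    pvVals d k (n + 1) = d.getD k "" :: pvVals d (k + 1) n := by
  unfold pvVals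
  rw [List.range_succ_eq_map, List.map_cons, List.map_map]
  simp only [Nat.cast_zero, add_zero]
  congr 1
  apply List.map_congr_left
  intro j hj
  simp only [Function.comp_apply, Nat.succ_eq_add_one]
  congr 1
  push_cast
  ring

theorem pvVals_add (d : PySem.Dict Int String) (k : Int) (m n : Nat) :
    pvVals d k (m + n) = pvVals d k m ++ pvVals d (k + m) n := by
  induction m generalizing k with
  | zero => simp [pvVals]
  | succ m ih =>
    have h1 : m + 1 + n = (m + n) + 1 := by omega
    rw [h1, pvVals_succ, ih, pvVals_succ]
    simp only [List.cons_append]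
    congr 2
    · push_cast; ring_nf

theorem pvVals_length (d : PySem.Dict Int String) (k : Int) (n : Nat) :
    (pvVals d k n).length = n := by simp [pvVals]

theorem pvVals_congr (d d' : PySem.Dict Int String) (k : Int) (n : Nat)
    (h : ∀ j : Nat, j < n → d.getD (k + j) "" = d'.getD (k + j) "") :
    pvVals d k n = pvVals d' k n := by
  unfold pvVals
  apply List.map_congr_left
  intro j hj
  exact h j (List.mem_range.1 hj)

-- lemmas about Dict.erase (whose items are items.filter on the key)
theorem pv_keys_erase (d : PySem.Dict Int String) (k : Int) :
    (d.erase k).keys = d.keys.filter (fun x => !(x == k)) := by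
  obtain ⟨items⟩ := d
  induction items with
  | nil => rfl
  | cons a t ih =>
    by_cases h : a.1 = k <;>
      simp_all [PySem.Dict.erase, PySem.Dict.keys, List.filter_cons]

theorem pv_nodup_keys_erase (d : PySem.Dict Int String) (k : Int) (h : d.keys.Nodup) :
    (d.erase k).keys.Nodup := by
  rw [pv_keys_erase]; exact h.filter _

theorem pv_contains_erase (d : PySem.Dict Int String) (k x : Int) (hne : x ≠ k) :
    (d.erase k).contains x = d.contains x := by
  rw [Bool.eq_iff_iff, PySem.Dict.contains_iff_mem_keys, PySem.Dict.contains_iff_mem_keys,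
    pv_keys_erase]
  simp [List.mem_filter, hne]

theorem pv_find?_filter (k x : Int) (hne : x ≠ k) : ∀ l : List (Int × String),
    (l.filter (fun p => !(p.1 == k))).find? (fun p => p.1 == x) = l.find? (fun p => p.1 == x)
  | [] => rfl
  | a :: t => by
    by_cases h1 : a.1 = x
    · have h2 : ¬ (a.1 = k) := by omega
      simp [List.filter_cons, h1, h2, List.find?_cons, hne]
    · by_cases h2 : a.1 = k <;>
        simp [List.filter_cons, h1, h2, List.find?_cons, hne, Ne.symm hne,
          pv_find?_filter k x hne t]

theorem pv_get?_erase (d : PySem.Dict Int String) (k x : Int) (hne : x ≠ k) :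
    (d.erase k).get? x = d.get? x := by
  simp [PySem.Dict.get?, PySem.Dict.erase, pv_find?_filter k x hne]

theorem pv_getD_erase (d : PySem.Dict Int String) (k x : Int) (hne : x ≠ k) :
    (d.erase k).getD x "" = d.getD x "" := by
  simp [PySem.Dict.getD, pv_get?_erase d k x hne]

theorem pv_size_erase (d : PySem.Dict Int String) (k : Int) (hnd : d.keys.Nodup)
    (hc : d.contains k = true) : (d.erase k).size = d.size - 1 := by
  have hk : k ∈ d.keys := (PySem.Dict.contains_iff_mem_keys d k).1 hc
  have h1 : (d.erase k).size = (d.erase k).keys.length := by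
    simp [PySem.Dict.size, PySem.Dict.keys]
  have h2 : d.size = d.keys.length := by simp [PySem.Dict.size, PySem.Dict.keys]
  rw [h1, h2, pv_keys_erase, ← List.countP_eq_length_filter]
  have h3 := List.length_eq_countP_add_countP (fun x => x == k) (l := d.keys)
  have h4 : List.countP (fun x => x == k) d.keys = 1 := by
    have := List.count_eq_one_of_mem hnd hk
    simpa [List.count] using this
  have h6 : List.countP (fun x => !(x == k)) d.keys
      = List.countP (fun a => decide ¬(a == k) = true) d.keys := by
    apply List.countP_congr; intro a _; simp
  rw [h6]
  omega

-- pigeonhole facts about a dict whose keys contain a consecutive run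
theorem pv_keys_length (d : PySem.Dict Int String) : d.keys.length = d.size := by
  simp [PySem.Dict.size, PySem.Dict.keys]

theorem pv_range_nodup (k : Int) (c : Nat) :
    ((List.range c).map (fun j : Nat => k + (j : Int))).Nodup := by
  refine List.Nodup.map ?_ List.nodup_range
  intro a b h
  simp only [add_right_inj, Nat.cast_inj] at h
  exact h

theorem pv_range_subset (d : PySem.Dict Int String) (k : Int) (c : Nat)
    (h : ∀ j : Nat, j < c → d.contains (k + j) = true) :
    ((List.range c).map (fun j : Nat => k + (j : Int))) ⊆ d.keys := by
  intro x hx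
  simp only [List.mem_map, List.mem_range] at hx
  obtain ⟨j, hj, rfl⟩ := hx
  exact (PySem.Dict.contains_iff_mem_keys d _).1 (h j hj)

theorem pv_le_size_of_all_contains (d : PySem.Dict Int String) (k : Int) (c : Nat)
    (hnd : d.keys.Nodup) (h : ∀ j : Nat, j < c → d.contains (k + j) = true) :
    c ≤ d.size := by
  have := (List.subperm_of_subset (pv_range_nodup k c) (pv_range_subset d k c h)).length_le
  simpa [pv_keys_length] using this

-- erase the keys k, k+1, …, k+c-1
def pvEraseRange (d : PySem.Dict Int String) (k : Int) : Nat → PySem.Dict Int String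
  | 0 => d
  | c + 1 => pvEraseRange (d.erase k) (k + 1) c

theorem pv_contains_eraseRange (c : Nat) : ∀ (d : PySem.Dict Int String) (k x : Int),
    (∀ j : Nat, j < c → x ≠ k + j) →
    (pvEraseRange d k c).contains x = d.contains x := by
  induction c with
  | zero => intro d k x _; rfl
  | succ c ih =>
    intro d k x hx
    show (pvEraseRange (d.erase k) (k + 1) c).contains x = d.contains x
    rw [ih (d.erase k) (k + 1) x (by
      intro j hj
      have := hx (j + 1) (by omega)
      push_cast at this ⊢
      intro hcon; apply this; omega),
      pv_contains_erase d k x (by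
        have := hx 0 (by omega)
        simpa using this)]

theorem pv_getD_eraseRange (c : Nat) : ∀ (d : PySem.Dict Int String) (k x : Int),
    (∀ j : Nat, j < c → x ≠ k + j) →
    (pvEraseRange d k c).getD x "" = d.getD x "" := by
  induction c with
  | zero => intro d k x _; rfl
  | succ c ih =>
    intro d k x hx
    show (pvEraseRange (d.erase k) (k + 1) c).getD x "" = d.getD x ""
    rw [ih (d.erase k) (k + 1) x (by
      intro j hj
      have := hx (j + 1) (by omega)
      push_cast at this ⊢
      intro hcon; apply this; omega),
      pv_getD_erase d k x (by
        have := hx 0 (by omega)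
        simpa using this)]

theorem pv_nodup_eraseRange (c : Nat) : ∀ (d : PySem.Dict Int String) (k : Int),
    d.keys.Nodup → (pvEraseRange d k c).keys.Nodup := by
  induction c with
  | zero => intro d k h; exact h
  | succ c ih =>
    intro d k h
    exact ih (d.erase k) (k + 1) (pv_nodup_keys_erase d k h)

theorem pv_size_eraseRange (c : Nat) : ∀ (d : PySem.Dict Int String) (k : Int),
    d.keys.Nodup → (∀ j : Nat, j < c → d.contains (k + j) = true) →
    (pvEraseRange d k c).size = d.size - c := by
  induction c with
  | zero => intro d k _ _; rfl
  | succ c ih =>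
    intro d k hnd h
    have hc0 : d.contains k = true := by
      have := h 0 (by omega); simpa using this
    have hrec : ∀ j : Nat, j < c → (d.erase k).contains ((k + 1) + j) = true := by
      intro j hj
      rw [pv_contains_erase d k _ (by omega)]
      have := h (j + 1) (by omega)
      push_cast at this ⊢
      convert this using 2
      ring
    show (pvEraseRange (d.erase k) (k + 1) c).size = d.size - (c + 1)
    rw [ih (d.erase k) (k + 1) (pv_nodup_keys_erase d k hnd) hrec,
      pv_size_erase d k hnd hc0]
    omega

-- characterisation of the inner for-loop
theorem pvInnerA_eq (c : Nat) : ∀ (d : PySem.Dict Int String) (row : List String) (k : Int),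
    d.keys.Nodup →
    pvInnerA d row k c =
      if ∀ j : Nat, j < c → d.contains (k + j) = true
      then some (pvEraseRange d k c, row ++ pvVals d k c, k + c)
      else none := by
  induction c with
  | zero =>
    intro d row k _
    rw [if_pos (by omega)]
    simp [pvInnerA, pvEraseRange, pvVals]
  | succ c ih =>
    intro d row k hnd
    show (match d.pop? k with
      | some (v, d') => pvInnerA d' (row ++ [v]) (k + 1) c
      | none => none) = _
    cases hk : d.get? k with
    | none =>
      have hc : d.contains k = false := (PySem.Dict.get?_eq_none_iff_contains d k).1 hk
      rw [if_neg ?_]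
      · simp [PySem.Dict.pop?, hk]
      · intro hall
        have := hall 0 (by omega)
        simp [hc] at this
    | some v =>
      have hc : d.contains k = true := by
        rw [PySem.Dict.contains_eq_isSome_get?, hk]; rfl
      have hgd : d.getD k "" = v := by simp [PySem.Dict.getD, hk]
      have hpop : d.pop? k = some (v, d.erase k) := by simp [PySem.Dict.pop?, hk]
      rw [hpop]
      show pvInnerA (d.erase k) (row ++ [v]) (k + 1) c = _
      rw [ih (d.erase k) (row ++ [v]) (k + 1) (pv_nodup_keys_erase d k hnd)]
      have hcond : (∀ j : Nat, j < c → (d.erase k).contains ((k + 1) + j) = true)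
          ↔ (∀ j : Nat, j < c + 1 → d.contains (k + j) = true) := by
        constructor
        · intro hall j hj
          cases j with
          | zero => simpa using hc
          | succ j =>
            have := hall j (by omega)
            rw [pv_contains_erase d k _ (by omega)] at this
            push_cast at this ⊢
            convert this using 2
            ring
        · intro hall j hj
          rw [pv_contains_erase d k _ (by omega)]
          have := hall (j + 1) (by omega)
          push_cast at this ⊢
          convert this using 2
          ring
      by_cases hall : ∀ j : Nat, j < c + 1 → d.contains (k + j) = true
      · rw [if_pos (hcond.2 hall), if_pos hall]
        have hvals : pvVals (d.erase k) (k + 1) c = pvVals d (k + 1) c := by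
          apply pvVals_congr
          intro j hj
          exact pv_getD_erase d k _ (by omega)
        rw [hvals, pvVals_succ, hgd]
        show some (_, (row ++ [v]) ++ _, (k + 1) + (c : Int)) = some (_, row ++ v :: _, _)
        congr 1
        refine Prod.ext rfl (Prod.ext ?_ ?_)
        · simp
        · show (k + 1) + (c : Int) = k + ((c : Nat) + 1 : Nat)
          push_cast
          ring
      · rw [if_neg (fun hx => hall (hcond.1 hx)), if_neg hall]

theorem pvRows_cons (v : String) (rest : List String) (size : Nat) :
    pvRows (v :: rest) size =
      if size ≤ rest.length + 1 then
        (pvRows ((v :: rest).drop size) (size + 1)).map (((v :: rest).take size) :: ·)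
      else none := by
  rw [pvRows]

theorem pvRows_split (l₁ l₂ : List String) (c : Nat) (h₁ : l₁.length = c) (hc : 0 < c) :
    pvRows (l₁ ++ l₂) c = (pvRows l₂ (c + 1)).map (l₁ :: ·) := by
  cases l₁ with
  | nil => simp at h₁; omega
  | cons v rest =>
    rw [List.cons_append, pvRows_cons]
    have hlen : (rest ++ l₂).length = rest.length + l₂.length := by simp
    rw [if_pos ?_]
    · have ht : (v :: (rest ++ l₂)).take c = v :: rest := by
        rw [← List.cons_append, List.take_left' h₁]
      have hd : (v :: (rest ++ l₂)).drop c = l₂ := by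
        rw [← List.cons_append, List.drop_left' h₁]
      rw [ht, hd]
    · simp at h₁
      omega

theorem pvRows_none_of_lt (l : List String) (c : Nat) (h0 : 0 < l.length)
    (hlt : l.length < c) : pvRows l c = none := by
  cases l with
  | nil => simp at h0
  | cons v rest =>
    rw [pvRows_cons, if_neg ?_]
    simp at hlt ⊢
    omega

-- characterisation of the outer while-loop
theorem pvLoopA_eq (N : Nat) : ∀ (d : PySem.Dict Int String) (pyr : List (List String))
    (c : Nat) (k : Int), d.keys.Nodup → d.size < N → 0 < c →
    pvLoopA N d pyr c k =
      if ∀ j : Nat, j < d.size → d.contains (k + j) = true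
      then (pvRows (pvVals d k d.size) c).map (pyr ++ ·)
      else none := by
  induction N with
  | zero => intro d pyr c k _ hN _; omega
  | succ M ih =>
    intro d pyr c k hnd hN hc0
    show (if d.size = 0 then some pyr
      else match pvInnerA d [] k c with
        | some (d', row, nextKey') => pvLoopA M d' (pyr ++ [row]) (c + 1) nextKey'
        | none => none) = _
    by_cases h0 : d.size = 0
    · rw [if_pos h0, if_pos (by omega)]
      rw [h0]
      show some pyr = (pvRows [] c).map (pyr ++ ·)
      rw [pvRows]
      simp
    · rw [if_neg h0, pvInnerA_eq c d [] k hnd]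
      by_cases hc : ∀ j : Nat, j < c → d.contains (k + j) = true
      · rw [if_pos hc]
        have hcle : c ≤ d.size := pv_le_size_of_all_contains d k c hnd hc
        have hnd' := pv_nodup_eraseRange c d k hnd
        have hsz : (pvEraseRange d k c).size = d.size - c := pv_size_eraseRange c d k hnd hc
        show pvLoopA M (pvEraseRange d k c) (pyr ++ [[] ++ pvVals d k c]) (c + 1) (k + c) = _
        rw [ih (pvEraseRange d k c) _ (c + 1) (k + c) hnd' (by omega) (by omega)]
        by_cases hall : ∀ j : Nat, j < d.size → d.contains (k + j) = true
        · have hcond' : ∀ j : Nat, j < (pvEraseRange d k c).size →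
              (pvEraseRange d k c).contains ((k + c) + j) = true := by
            intro j hj
            rw [pv_contains_eraseRange c d k _ (by intro j' hj'; push_cast; omega)]
            have := hall (c + j) (by omega)
            have heq : k + ((c + j : Nat) : Int) = k + (c : Int) + (j : Int) := by
              push_cast; ring
            rwa [heq] at this
          rw [if_pos hcond', if_pos hall, hsz]
          have hv1 : pvVals (pvEraseRange d k c) (k + c) (d.size - c)
              = pvVals d (k + c) (d.size - c) := by
            apply pvVals_congr
            intro j hj
            apply pv_getD_eraseRange
            intro j' hj'
            push_cast
            omega
          rw [hv1]
          have hsplit : pvVals d k d.size = pvVals d k c ++ pvVals d (k + c) (d.size - c) := by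
            conv_lhs => rw [show d.size = c + (d.size - c) by omega]
            exact pvVals_add d k c (d.size - c)
          rw [hsplit, pvRows_split (pvVals d k c) _ c (pvVals_length d k c) hc0,
            Option.map_map]
          cases pvRows (pvVals d (k + c) (d.size - c)) (c + 1) <;> simp
        · rw [if_neg hall]
          push_neg at hall
          obtain ⟨j0, hj0lt, hj0⟩ := hall
          have hj0f : d.contains (k + j0) = false := by
            cases hcd : d.contains (k + (j0 : Int)) with
            | false => rfl
            | true => exact absurd hcd hj0
          have hj0c : c ≤ j0 := by
            by_contra hlt
            exact hj0 (hc j0 (by omega))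
          rw [if_neg ?_]
          intro hcon
          have := hcon (j0 - c) (by omega)
          rw [pv_contains_eraseRange c d k _ (by intro j' hj'; push_cast; omega)] at this
          have heq : k + (c : Int) + ((j0 - c : Nat) : Int) = k + (j0 : Int) := by
            push_cast [hj0c]
            ring
          rw [heq, hj0f] at this
          exact Bool.false_ne_true this
      · rw [if_neg hc]
        show (none : Option (List (List String))) = _
        by_cases hall : ∀ j : Nat, j < d.size → d.contains (k + j) = true
        · rw [if_pos hall]
          push_neg at hc
          obtain ⟨j0, hj0lt, hj0⟩ := hc
          have hnlt : d.size < c := by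
            by_contra hge
            exact hj0 (hall j0 (by omega))
          rw [pvRows_none_of_lt (pvVals d k d.size) c (by rw [pvVals_length]; omega)
            (by rw [pvVals_length]; omega)]
          rfl
        · rw [if_neg hall]

-- ===== VERDICT (by name: the statement is the Claim_ definition above) =====
theorem pv_map_nil_append (o : Option (List (List String))) :
    o.map (fun x : List (List String) => [] ++ x) = o := by
  cases o <;> simp

theorem createPyramid_key (d : PySem.Dict Int String) (hnd : d.keys.Nodup) :
    pvLoopA (d.size + 1) d [] 1 1 =
      (if ((PySem.List.pyRange 1 ((d.size : Int) + 1) 1).any fun k => !(d.contains k)) = true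
       then none
       else pvRows ((PySem.List.pyRange 1 ((d.size : Int) + 1) 1).map (fun k => d.getD k "")) 1) := by
  rw [pvLoopA_eq (d.size + 1) d [] 1 1 hnd (by omega) (by omega)]
  have hrange : PySem.List.pyRange 1 ((d.size : Int) + 1) 1
      = (List.range d.size).map (fun j : Nat => 1 + (j : Int)) := by
    rw [PySem.List.pyRange_one]
    congr 1
    simp
  rw [hrange]
  by_cases hall : ∀ j : Nat, j < d.size → d.contains (1 + j) = true
  · rw [if_pos hall, if_neg ?_]
    · rw [List.map_map]
      exact pv_map_nil_append _
    · intro hany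
      simp only [List.any_map, List.any_eq_true, List.mem_range, Function.comp] at hany
      obtain ⟨j, hj, hcon⟩ := hany
      rw [hall j hj] at hcon
      simp at hcon
  · rw [if_neg hall, if_pos ?_]
    push_neg at hall
    obtain ⟨j0, hj0lt, hj0⟩ := hall
    simp only [List.any_map, List.any_eq_true, List.mem_range, Function.comp]
    exact ⟨j0, hj0lt, by simp [Bool.eq_false_iff.2 hj0]⟩

theorem createPyramid_spec : Claim_equal_createPyramid := by
  intro dict _
  show createPyramid dict = createPyramid_alt dict
  exact createPyramid_key (PySem.Dict.ofList dict) (PySem.Dict.nodup_keys_ofList dict)
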